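-- pv_equiv track=rewrite | github.com/sporkins/sdxl-dataset-tag-tidy | app/services/tag_service.py | compute_hints
-- ===== SOURCE A (Python) =====
-- from typing import Dict, List, Set
--
-- def compute_hints(tags: List[str]) -> Dict[str, List[str]]:
--     normalized = [t.lower() for t in tags]
--     hints = {
--         "missing_required": [],
--         "possibly_missing": [],
--         "not_required": ["background"],
--     }
--
--     has_from_behind = any("from behind" in t or "from-behind" in t for t in normalized)
--     has_close_up = any(
--         keyword in t
--         for t in normalized
--         for keyword in ["close-up", "close up", "headshot", "portrait", "bust"]
--     )
--     has_full_body = any("full body" in t or "full-body" in t for t in normalized)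
--     has_pose = any("pose" in t or t in {"standing", "sitting", "kneeling"} for t in normalized)
--     has_expression = any(
--         t in {"smile", "frown", "neutral expression", "open mouth", "closed mouth"} or "expression" in t
--         for t in normalized
--     )
--     has_gaze = any("gaze" in t or "looking" in t for t in normalized)
--     has_clothing = any(
--         t in {"swimsuit", "dress", "coat", "shirt", "jacket", "pants", "skirt"} or "clothing" in t
--         for t in normalized
--     )
--     has_identity = any(":" in t or t.startswith("id ") for t in normalized)
--     has_framing = any(
--         key in t
--         for t in normalized
--         for key in ["wide shot", "full body", "medium shot", "close-up", "close up", "headshot", "portrait"]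
--     )
--     face_likely_visible = not has_from_behind
--
--     pose_required = has_full_body or not has_close_up
--     if pose_required and not has_pose:
--         hints["missing_required"].append("pose")
--     elif has_close_up and not has_pose:
--         hints["not_required"].append("pose")
--
--     if face_likely_visible and not has_expression:
--         hints["possibly_missing"].append("expression")
--     if not has_from_behind and not has_gaze:
--         hints["possibly_missing"].append("gaze")
--     else:
--         if has_from_behind:
--             hints["not_required"].extend(["expression", "gaze"])
--
--     if not has_clothing:
--         hints["missing_required"].append("clothing")
--     if not has_identity:
--         hints["missing_required"].append("identity token")
--     if not has_framing:
--         hints["missing_required"].append("framing/composition")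
--
--     # remove duplicates while preserving order
--     for key in hints:
--         seen: Set[str] = set()
--         deduped: List[str] = []
--         for item in hints[key]:
--             if item not in seen:
--                 seen.add(item)
--                 deduped.append(item)
--         hints[key] = deduped
--     return hints
-- ===== SOURCE B (Python) =====
-- _POSE_WORDS = {"standing", "sitting", "kneeling"}
-- _EXPR_WORDS = {"smile", "frown", "neutral expression", "open mouth", "closed mouth"}
-- _CLOTH_WORDS = {"swimsuit", "dress", "coat", "shirt", "jacket", "pants", "skirt"}
--
--
-- def _categories(t):
--     """Classify ONE lowercased tag into the set of evidence categories it provides."""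
--     cats = set()
--     if "from behind" in t or "from-behind" in t:
--         cats.add("behind")
--     if any(k in t for k in ("close-up", "close up", "headshot", "portrait", "bust")):
--         cats.add("closeup")
--     if "full body" in t or "full-body" in t:
--         cats.add("fullbody")
--     if "pose" in t or t in _POSE_WORDS:
--         cats.add("pose")
--     if t in _EXPR_WORDS or "expression" in t:
--         cats.add("expression")
--     if "gaze" in t or "looking" in t:
--         cats.add("gaze")
--     if t in _CLOTH_WORDS or "clothing" in t:
--         cats.add("clothing")
--     if ":" in t or t.startswith("id "):
--         cats.add("identity")
--     if any(k in t for k in ("wide shot", "full body", "medium shot", "close-up", "close up", "headshot", "portrait")):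
--         cats.add("framing")
--     return cats
--
--
-- def compute_hints(tags):
--     # classify each tag once, take the union of the evidence
--     cats = set()
--     for s in tags:
--         cats |= _categories(s.lower())
--     behind = "behind" in cats
--     closeup = "closeup" in cats
--     pose = "pose" in cats
--     need_pose = ("fullbody" in cats or not closeup) and not pose
--     # declarative rule table: (bucket, items, active?) in output order
--     rules = [
--         ("missing_required", ["pose"], need_pose),
--         ("missing_required", ["clothing"], "clothing" not in cats),
--         ("missing_required", ["identity token"], "identity" not in cats),
--         ("missing_required", ["framing/composition"], "framing" not in cats),
--         ("possibly_missing", ["expression"], not behind and "expression" not in cats),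
--         ("possibly_missing", ["gaze"], not behind and "gaze" not in cats),
--         ("not_required", ["pose"], not need_pose and closeup and not pose),
--         ("not_required", ["expression", "gaze"], behind),
--     ]
--     hints = {"missing_required": [], "possibly_missing": [], "not_required": ["background"]}
--     for key, items, active in rules:
--         if active:
--             hints[key] += items
--     return hints
-- ===== Notes on version B (the rewrite author's own statement) =====
-- stated objective: alternative
-- what changed: B inverts the traversal: instead of A's ten any-scans over the whole tag list, B classifies each tag once into a set of evidence categories and unions those sets, then replaces A's if/elif decision tree and dedup pass with a declarative rule table (bucket, items, condition) folded into the result dict.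
import Mathlib
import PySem

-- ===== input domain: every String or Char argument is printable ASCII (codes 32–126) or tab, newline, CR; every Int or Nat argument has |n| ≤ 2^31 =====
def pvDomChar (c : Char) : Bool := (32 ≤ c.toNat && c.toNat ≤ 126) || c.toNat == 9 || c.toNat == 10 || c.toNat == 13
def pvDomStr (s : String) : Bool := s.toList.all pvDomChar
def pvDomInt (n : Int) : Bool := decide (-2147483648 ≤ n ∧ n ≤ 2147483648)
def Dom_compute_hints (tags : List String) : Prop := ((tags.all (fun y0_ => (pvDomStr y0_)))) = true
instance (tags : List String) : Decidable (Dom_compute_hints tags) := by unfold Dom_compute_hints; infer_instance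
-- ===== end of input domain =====

-- B inverts the traversal: it classifies each tag once into a set of evidence
-- categories (union over the tags) and replaces A's if/elif decision tree and
-- final dedup pass with a declarative rule table folded into the result dict;
-- same output. Objective: alternative.

-- ===== PORT A =====
def compute_hints (tags : List String) : List (String × List String) :=
  let normalized := tags.map (fun t => PySem.Str.lower t)
  let hints : PySem.Dict String (List String) :=
    ((PySem.Dict.empty.insert "missing_required" []).insert "possibly_missing" []).insert "not_required" ["background"]
  let has_from_behind := normalized.any (fun t => PySem.Str.isIn "from behind" t || PySem.Str.isIn "from-behind" t)
  let has_close_up := normalized.any (fun t =>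
    (["close-up", "close up", "headshot", "portrait", "bust"] : List String).any (fun k => PySem.Str.isIn k t))
  let has_full_body := normalized.any (fun t => PySem.Str.isIn "full body" t || PySem.Str.isIn "full-body" t)
  let has_pose := normalized.any (fun t =>
    PySem.Str.isIn "pose" t || (t == "standing" || t == "sitting" || t == "kneeling"))
  let has_expression := normalized.any (fun t =>
    (t == "smile" || t == "frown" || t == "neutral expression" || t == "open mouth" || t == "closed mouth")
      || PySem.Str.isIn "expression" t)
  let has_gaze := normalized.any (fun t => PySem.Str.isIn "gaze" t || PySem.Str.isIn "looking" t)
  let has_clothing := normalized.any (fun t =>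
    (t == "swimsuit" || t == "dress" || t == "coat" || t == "shirt" || t == "jacket" || t == "pants" || t == "skirt")
      || PySem.Str.isIn "clothing" t)
  let has_identity := normalized.any (fun t => PySem.Str.isIn ":" t || PySem.Str.startswith t "id ")
  let has_framing := normalized.any (fun t =>
    (["wide shot", "full body", "medium shot", "close-up", "close up", "headshot", "portrait"] : List String).any
      (fun k => PySem.Str.isIn k t))
  let face_likely_visible := !has_from_behind
  let pose_required := has_full_body || !has_close_up
  let hints :=
    if pose_required && !has_pose then hints.modify "missing_required" [] (fun l => l ++ ["pose"])
    else if has_close_up && !has_pose then hints.modify "not_required" [] (fun l => l ++ ["pose"])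
    else hints
  let hints :=
    if face_likely_visible && !has_expression then hints.modify "possibly_missing" [] (fun l => l ++ ["expression"])
    else hints
  let hints :=
    if !has_from_behind && !has_gaze then hints.modify "possibly_missing" [] (fun l => l ++ ["gaze"])
    else if has_from_behind then hints.modify "not_required" [] (fun l => l ++ ["expression", "gaze"])
    else hints
  let hints := if !has_clothing then hints.modify "missing_required" [] (fun l => l ++ ["clothing"]) else hints
  let hints := if !has_identity then hints.modify "missing_required" [] (fun l => l ++ ["identity token"]) else hints
  let hints := if !has_framing then hints.modify "missing_required" [] (fun l => l ++ ["framing/composition"]) else hints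
  let hints := hints.keys.foldl (fun h key =>
      let st := (h.getD key []).foldl
        (fun (st : PySem.Set String × List String) item =>
          if !(st.1.contains item) then (st.1.add item, st.2 ++ [item]) else st)
        (PySem.Set.empty, [])
      h.insert key st.2) hints
  hints.items

-- ===== PORT B =====
-- Python's 'if cond: cats.add(x)' on the set being built
def pvAddIf (b : Bool) (x : String) (s : PySem.Set String) : PySem.Set String :=
  if b then PySem.Set.add s x else s

-- _categories: classify one lowercased tag into its set of evidence categories
def pvCategories (t : String) : PySem.Set String :=
  let cats : PySem.Set String := PySem.Set.empty
  let cats := pvAddIf (PySem.Str.isIn "from behind" t || PySem.Str.isIn "from-behind" t) "behind" cats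
  let cats := pvAddIf ((["close-up", "close up", "headshot", "portrait", "bust"] : List String).any
      (fun k => PySem.Str.isIn k t)) "closeup" cats
  let cats := pvAddIf (PySem.Str.isIn "full body" t || PySem.Str.isIn "full-body" t) "fullbody" cats
  let cats := pvAddIf (PySem.Str.isIn "pose" t || (t == "standing" || t == "sitting" || t == "kneeling")) "pose" cats
  let cats := pvAddIf ((t == "smile" || t == "frown" || t == "neutral expression" || t == "open mouth" || t == "closed mouth")
      || PySem.Str.isIn "expression" t) "expression" cats
  let cats := pvAddIf (PySem.Str.isIn "gaze" t || PySem.Str.isIn "looking" t) "gaze" cats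
  let cats := pvAddIf ((t == "swimsuit" || t == "dress" || t == "coat" || t == "shirt" || t == "jacket" || t == "pants" || t == "skirt")
      || PySem.Str.isIn "clothing" t) "clothing" cats
  let cats := pvAddIf (PySem.Str.isIn ":" t || PySem.Str.startswith t "id ") "identity" cats
  let cats := pvAddIf ((["wide shot", "full body", "medium shot", "close-up", "close up", "headshot", "portrait"] : List String).any
      (fun k => PySem.Str.isIn k t)) "framing" cats
  cats

def compute_hints_alt (tags : List String) : List (String × List String) :=
  let cats := tags.foldl (fun s t => PySem.Set.union s (pvCategories (PySem.Str.lower t))) PySem.Set.empty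
  let behind := PySem.Set.contains cats "behind"
  let closeup := PySem.Set.contains cats "closeup"
  let pose := PySem.Set.contains cats "pose"
  let need_pose := (PySem.Set.contains cats "fullbody" || !closeup) && !pose
  let rules : List (String × List String × Bool) :=
    [("missing_required", ["pose"], need_pose),
     ("missing_required", ["clothing"], !(PySem.Set.contains cats "clothing")),
     ("missing_required", ["identity token"], !(PySem.Set.contains cats "identity")),
     ("missing_required", ["framing/composition"], !(PySem.Set.contains cats "framing")),
     ("possibly_missing", ["expression"], !behind && !(PySem.Set.contains cats "expression")),
     ("possibly_missing", ["gaze"], !behind && !(PySem.Set.contains cats "gaze")),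
     ("not_required", ["pose"], !need_pose && (closeup && !pose)),
     ("not_required", ["expression", "gaze"], behind)]
  let hints : PySem.Dict String (List String) :=
    ((PySem.Dict.empty.insert "missing_required" []).insert "possibly_missing" []).insert "not_required" ["background"]
  let hints := rules.foldl (fun h r => if r.2.2 then h.modify r.1 [] (fun l => l ++ r.2.1) else h) hints
  hints.items

-- ===== PRECONDITION & SPEC =====
def Spec_compute_hints (tags : List String) (out : List (String × List String)) : Prop := out = compute_hints_alt tags
instance (tags : List String) (out : List (String × List String)) : Decidable (Spec_compute_hints tags out) := by unfold Spec_compute_hints; infer_instance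

-- ===== CLAIM (what is proved, stated in full; the proofs are below) =====
def Claim_equal_compute_hints : Prop := ∀ (tags : List String), Dom_compute_hints tags → Spec_compute_hints tags (compute_hints tags)

-- ===== LEMMAS AND PROOFS =====

theorem pvContains_empty (c : String) : PySem.Set.contains (PySem.Set.empty) c = false := by
  simp [PySem.Set.contains, PySem.Set.empty]

theorem pvMem_addIf (b : Bool) (x : String) (s : PySem.Set String) (c : String) :
    c ∈ pvAddIf b x s ↔ (c ∈ s ∨ (b = true ∧ c = x)) := by
  cases b <;> simp [pvAddIf, PySem.Set.mem_add]

theorem pvContains_union (s t : PySem.Set String) (c : String) :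
    PySem.Set.contains (PySem.Set.union s t) c = (PySem.Set.contains s c || PySem.Set.contains t c) := by
  refine Bool.eq_iff_iff.mpr ?_
  simp [PySem.Set.mem_union]

theorem pvContains_fold (tags : List String) (s : PySem.Set String) (c : String) :
    PySem.Set.contains
      (tags.foldl (fun s t => PySem.Set.union s (pvCategories (PySem.Str.lower t))) s) c
    = (PySem.Set.contains s c
        || tags.any (fun t => PySem.Set.contains (pvCategories (PySem.Str.lower t)) c)) := by
  induction tags generalizing s with
  | nil => simp
  | cons t ts ih =>
    simp only [List.foldl_cons, List.any_cons, ih, pvContains_union, Bool.or_assoc]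

theorem pvCat_behind (t : String) : PySem.Set.contains (pvCategories t) "behind"
    = (PySem.Str.isIn "from behind" t || PySem.Str.isIn "from-behind" t) := by
  refine Bool.eq_iff_iff.mpr ?_
  simp [pvCategories, pvMem_addIf]

theorem pvCat_closeup (t : String) : PySem.Set.contains (pvCategories t) "closeup"
    = (["close-up", "close up", "headshot", "portrait", "bust"] : List String).any (fun k => PySem.Str.isIn k t) := by
  refine Bool.eq_iff_iff.mpr ?_
  simp [pvCategories, pvMem_addIf]

theorem pvCat_fullbody (t : String) : PySem.Set.contains (pvCategories t) "fullbody"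
    = (PySem.Str.isIn "full body" t || PySem.Str.isIn "full-body" t) := by
  refine Bool.eq_iff_iff.mpr ?_
  simp [pvCategories, pvMem_addIf]

theorem pvCat_pose (t : String) : PySem.Set.contains (pvCategories t) "pose"
    = (PySem.Str.isIn "pose" t || (t == "standing" || t == "sitting" || t == "kneeling")) := by
  refine Bool.eq_iff_iff.mpr ?_
  simp [pvCategories, pvMem_addIf]

theorem pvCat_expression (t : String) : PySem.Set.contains (pvCategories t) "expression"
    = ((t == "smile" || t == "frown" || t == "neutral expression" || t == "open mouth" || t == "closed mouth")
        || PySem.Str.isIn "expression" t) := by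
  refine Bool.eq_iff_iff.mpr ?_
  simp [pvCategories, pvMem_addIf]

theorem pvCat_gaze (t : String) : PySem.Set.contains (pvCategories t) "gaze"
    = (PySem.Str.isIn "gaze" t || PySem.Str.isIn "looking" t) := by
  refine Bool.eq_iff_iff.mpr ?_
  simp [pvCategories, pvMem_addIf]

theorem pvCat_clothing (t : String) : PySem.Set.contains (pvCategories t) "clothing"
    = ((t == "swimsuit" || t == "dress" || t == "coat" || t == "shirt" || t == "jacket" || t == "pants" || t == "skirt")
        || PySem.Str.isIn "clothing" t) := by
  refine Bool.eq_iff_iff.mpr ?_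
  simp [pvCategories, pvMem_addIf]

theorem pvCat_identity (t : String) : PySem.Set.contains (pvCategories t) "identity"
    = (PySem.Str.isIn ":" t || PySem.Str.startswith t "id ") := by
  refine Bool.eq_iff_iff.mpr ?_
  simp [pvCategories, pvMem_addIf]

theorem pvCat_framing (t : String) : PySem.Set.contains (pvCategories t) "framing"
    = (["wide shot", "full body", "medium shot", "close-up", "close up", "headshot", "portrait"] : List String).any
        (fun k => PySem.Str.isIn k t) := by
  refine Bool.eq_iff_iff.mpr ?_
  simp [pvCategories, pvMem_addIf]

theorem pvAssembly (fb cu flb pose expr gz cloth ident fram : Bool) :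
    (let hints : PySem.Dict String (List String) :=
      ((PySem.Dict.empty.insert "missing_required" []).insert "possibly_missing" []).insert "not_required" ["background"]
     let hints :=
       if (flb || !cu) && !pose then hints.modify "missing_required" [] (fun l => l ++ ["pose"])
       else if cu && !pose then hints.modify "not_required" [] (fun l => l ++ ["pose"])
       else hints
     let hints :=
       if (!fb) && !expr then hints.modify "possibly_missing" [] (fun l => l ++ ["expression"])
       else hints
     let hints :=
       if !fb && !gz then hints.modify "possibly_missing" [] (fun l => l ++ ["gaze"])
       else if fb then hints.modify "not_required" [] (fun l => l ++ ["expression", "gaze"])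
       else hints
     let hints := if !cloth then hints.modify "missing_required" [] (fun l => l ++ ["clothing"]) else hints
     let hints := if !ident then hints.modify "missing_required" [] (fun l => l ++ ["identity token"]) else hints
     let hints := if !fram then hints.modify "missing_required" [] (fun l => l ++ ["framing/composition"]) else hints
     let hints := hints.keys.foldl (fun h key =>
         let st := (h.getD key []).foldl
           (fun (st : PySem.Set String × List String) item =>
             if !(st.1.contains item) then (st.1.add item, st.2 ++ [item]) else st)
           (PySem.Set.empty, [])
         h.insert key st.2) hints
     hints.items) =
    (let need_pose := (flb || !cu) && !pose
     let rules : List (String × List String × Bool) :=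
       [("missing_required", ["pose"], need_pose),
        ("missing_required", ["clothing"], !cloth),
        ("missing_required", ["identity token"], !ident),
        ("missing_required", ["framing/composition"], !fram),
        ("possibly_missing", ["expression"], !fb && !expr),
        ("possibly_missing", ["gaze"], !fb && !gz),
        ("not_required", ["pose"], !need_pose && (cu && !pose)),
        ("not_required", ["expression", "gaze"], fb)]
     let hints : PySem.Dict String (List String) :=
       ((PySem.Dict.empty.insert "missing_required" []).insert "possibly_missing" []).insert "not_required" ["background"]
     let hints := rules.foldl (fun h r => if r.2.2 then h.modify r.1 [] (fun l => l ++ r.2.1) else h) hints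
     hints.items) := by
  revert fb cu flb pose expr gz cloth ident fram
  decide

-- ===== VERDICT (by name: the statement is the Claim_ definition above) =====
theorem compute_hints_spec : Claim_equal_compute_hints := by
  intro tags _
  show compute_hints tags = compute_hints_alt tags
  simp only [compute_hints, compute_hints_alt, List.any_map, Function.comp_def,
    pvContains_fold, pvContains_empty, Bool.false_or,
    pvCat_behind, pvCat_closeup, pvCat_fullbody, pvCat_pose, pvCat_expression,
    pvCat_gaze, pvCat_clothing, pvCat_identity, pvCat_framing]
  exact pvAssembly _ _ _ _ _ _ _ _ _
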